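-- pv_equiv track=rewrite | github.com/apache/airflow | dev/breeze/src/airflow_breeze/utils/release_validator.py | _get_prerequisites_for_checks
-- ===== SOURCE A (Python) =====
-- from enum import Enum
--
-- class CheckType(str, Enum):
--     SVN = "svn"
--     REPRODUCIBLE_BUILD = "reproducible-build"
--     SIGNATURES = "signatures"
--     CHECKSUMS = "checksums"
--     LICENSES = "licenses"
--
-- def _get_prerequisites_for_checks(checks: list[CheckType]) -> dict[str, list[CheckType]]:
--     """Return mapping of prerequisite -> list of checks that require it."""
--     # Define which checks require which prerequisites
--     prereq_map = {
--         "java": [CheckType.LICENSES],  # Apache RAT requires Java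
--         "gpg": [CheckType.SIGNATURES],  # GPG signature verification
--         "svn": list(CheckType),  # All checks need SVN files
--         "docker": [CheckType.REPRODUCIBLE_BUILD],  # Docker builds
--         "hatch": [CheckType.REPRODUCIBLE_BUILD],  # Package builds
--         "clean_git": [CheckType.REPRODUCIBLE_BUILD],  # No uncommitted changes
--     }
--
--     # Filter to only prerequisites needed for the selected checks
--     needed: dict[str, list[CheckType]] = {}
--     for prereq, required_by in prereq_map.items():
--         matching = [c for c in checks if c in required_by]
--         if matching:
--             needed[prereq] = matching
--     return needed
-- ===== SOURCE B (Python) =====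
-- _PREREQ_ORDER = ("java", "gpg", "svn", "docker", "hatch", "clean_git")
--
-- # Inverted index: which prerequisites each check value triggers.
-- _INDEX = {
--     "svn": ("svn",),
--     "reproducible-build": ("svn", "docker", "hatch", "clean_git"),
--     "signatures": ("gpg", "svn"),
--     "checksums": ("svn",),
--     "licenses": ("java", "svn"),
-- }
--
-- def _get_prerequisites_for_checks(checks):
--     """Return mapping of prerequisite -> list of checks that require it."""
--     buckets = {}
--     for c in checks:
--         for p in _INDEX.get(c, ()):
--             buckets.setdefault(p, []).append(c)
--     return {p: buckets[p] for p in _PREREQ_ORDER if p in buckets}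
-- ===== Notes on version B (the rewrite author's own statement) =====
-- stated objective: faster
-- what changed: Replaces the per-prerequisite filtering passes over checks with a single pass over checks that consults a precomputed inverted index (check -> prerequisites it triggers) and appends into per-prerequisite buckets, emitted in the fixed prerequisite order.
import Mathlib
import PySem

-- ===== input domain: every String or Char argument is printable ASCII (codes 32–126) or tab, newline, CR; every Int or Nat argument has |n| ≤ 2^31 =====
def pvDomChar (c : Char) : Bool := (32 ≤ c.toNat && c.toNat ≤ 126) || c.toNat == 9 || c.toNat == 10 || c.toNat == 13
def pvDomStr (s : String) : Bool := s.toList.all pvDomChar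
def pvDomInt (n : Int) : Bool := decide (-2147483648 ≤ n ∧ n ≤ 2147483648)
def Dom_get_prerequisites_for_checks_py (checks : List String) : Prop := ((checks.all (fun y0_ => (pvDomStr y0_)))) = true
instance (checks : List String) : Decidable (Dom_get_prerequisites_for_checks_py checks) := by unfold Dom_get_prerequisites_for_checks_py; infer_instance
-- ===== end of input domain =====

-- B replaces A's six filtering passes over `checks` with one pass consulting an inverted
-- index (check -> prerequisites), emitting buckets in the fixed prerequisite order (alternative decomposition).

-- ===== PORT A =====
-- prereq_map, in insertion order; CheckType values as their strings (str Enum compares by value).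
def pvPrereqMap : List (String × List String) :=
  [("java", ["licenses"]),
   ("gpg", ["signatures"]),
   ("svn", ["svn", "reproducible-build", "signatures", "checksums", "licenses"]),
   ("docker", ["reproducible-build"]),
   ("hatch", ["reproducible-build"]),
   ("clean_git", ["reproducible-build"])]

-- `needed[prereq] = matching`: the keys of prereq_map are pairwise distinct, so each dict
-- insertion is an append of a fresh key; the assoc list is built by appending.
def get_prerequisites_for_checks_py (checks : List String) : List (String × List String) :=
  pvPrereqMap.foldl (fun needed pr =>
    let matching := checks.filter (fun c => pr.2.contains c)
    if matching.isEmpty then needed else needed ++ [(pr.1, matching)]) []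

-- ===== PORT B =====
-- _INDEX.get(c, ()): literal dict lookup as an if-chain over the five check values.
def pvIndex (c : String) : List String :=
  if c == "svn" then ["svn"]
  else if c == "reproducible-build" then ["svn", "docker", "hatch", "clean_git"]
  else if c == "signatures" then ["gpg", "svn"]
  else if c == "checksums" then ["svn"]
  else if c == "licenses" then ["java", "svn"]
  else []

-- inner loop body: buckets.setdefault(p, []).append(c)  ==  insert p (getD p [] ++ [c])
def pvInner (b : PySem.Dict String (List String)) (c : String) : PySem.Dict String (List String) :=
  (pvIndex c).foldl (fun b p => b.insert p (b.getD p [] ++ [c])) b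

def pvPrereqOrder : List String := ["java", "gpg", "svn", "docker", "hatch", "clean_git"]

def get_prerequisites_for_checks_py_alt (checks : List String) : List (String × List String) :=
  let buckets := checks.foldl pvInner PySem.Dict.empty
  pvPrereqOrder.foldl (fun acc p =>
    if buckets.contains p then acc ++ [(p, buckets.getD p [])] else acc) []

-- ===== PRECONDITION & SPEC =====
def Spec_get_prerequisites_for_checks_py (checks : List String) (out : List (String × List String)) : Prop := out = get_prerequisites_for_checks_py_alt checks
instance (checks : List String) (out : List (String × List String)) : Decidable (Spec_get_prerequisites_for_checks_py checks out) := by unfold Spec_get_prerequisites_for_checks_py; infer_instance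

-- ===== CLAIM (what is proved, stated in full; the proofs are below) =====
def Claim_equal_get_prerequisites_for_checks_py : Prop := ∀ (checks : List String), Dom_get_prerequisites_for_checks_py checks → Spec_get_prerequisites_for_checks_py checks (get_prerequisites_for_checks_py checks)

-- ===== LEMMAS AND PROOFS =====

theorem inner_getD (b : PySem.Dict String (List String)) (c p : String) :
    (pvInner b c).getD p [] = b.getD p [] ++ (if (pvIndex c).contains p then [c] else []) := by
  unfold pvInner pvIndex
  split_ifs <;>
    simp [List.foldl, PySem.Dict.getD_insert] <;>
    simp_all [List.contains_eq_mem] <;>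
    split_ifs <;> simp_all

theorem inner_contains (b : PySem.Dict String (List String)) (c p : String) :
    (pvInner b c).contains p = (b.contains p || (pvIndex c).contains p) := by
  unfold pvInner pvIndex
  split_ifs <;>
    simp [List.foldl, PySem.Dict.contains_insert, List.contains_eq_mem] <;>
    cases hb : b.contains p <;>
    simp_all [beq_eq_decide, Bool.or_comm, Bool.or_left_comm, Bool.or_assoc]

theorem fold_getD (checks : List String) (b : PySem.Dict String (List String)) (p : String) :
    (checks.foldl pvInner b).getD p [] =
      b.getD p [] ++ checks.filter (fun c => (pvIndex c).contains p) := by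
  induction checks generalizing b with
  | nil => simp
  | cons c cs ih =>
      simp only [List.foldl_cons, ih, inner_getD, List.filter_cons]
      split_ifs <;> simp_all

theorem fold_contains (checks : List String) (b : PySem.Dict String (List String)) (p : String) :
    (checks.foldl pvInner b).contains p =
      (b.contains p || !(checks.filter (fun c => (pvIndex c).contains p)).isEmpty) := by
  induction checks generalizing b with
  | nil => simp
  | cons c cs ih =>
      simp only [List.foldl_cons, ih, inner_contains, List.filter_cons]
      split_ifs <;> simp_all

-- pointwise agreement of the predicates, one per prerequisite
theorem idx_java (c : String) : (pvIndex c).contains "java" = (["licenses"] : List String).contains c := by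
  unfold pvIndex; split_ifs <;> simp_all
theorem idx_gpg (c : String) : (pvIndex c).contains "gpg" = (["signatures"] : List String).contains c := by
  unfold pvIndex; split_ifs <;> simp_all
theorem idx_svn (c : String) : (pvIndex c).contains "svn" = (["svn", "reproducible-build", "signatures", "checksums", "licenses"] : List String).contains c := by
  unfold pvIndex; split_ifs <;> simp_all
theorem idx_docker (c : String) : (pvIndex c).contains "docker" = (["reproducible-build"] : List String).contains c := by
  unfold pvIndex; split_ifs <;> simp_all
theorem idx_hatch (c : String) : (pvIndex c).contains "hatch" = (["reproducible-build"] : List String).contains c := by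
  unfold pvIndex; split_ifs <;> simp_all
theorem idx_clean_git (c : String) : (pvIndex c).contains "clean_git" = (["reproducible-build"] : List String).contains c := by
  unfold pvIndex; split_ifs <;> simp_all

theorem step_eq (l : List String) (acc : List (String × List String)) (p : String) :
    (if l.isEmpty = true then acc else acc ++ [(p, l)]) =
      (if (!l.isEmpty) = true then acc ++ [(p, l)] else acc) := by
  cases l <;> simp

-- ===== VERDICT (by name: the statement is the Claim_ definition above) =====
set_option maxHeartbeats 1000000 in
theorem get_prerequisites_for_checks_py_spec : Claim_equal_get_prerequisites_for_checks_py := by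
  intro checks _
  unfold Spec_get_prerequisites_for_checks_py
  simp only [get_prerequisites_for_checks_py, get_prerequisites_for_checks_py_alt,
    pvPrereqMap, pvPrereqOrder, List.foldl_cons, List.foldl_nil, fold_getD, fold_contains,
    PySem.Dict.getD_empty, PySem.Dict.contains_empty, Bool.false_or, List.nil_append,
    List.filter_congr (fun c _ => idx_java c),
    List.filter_congr (fun c _ => idx_gpg c),
    List.filter_congr (fun c _ => idx_svn c),
    List.filter_congr (fun c _ => idx_docker c),
    List.filter_congr (fun c _ => idx_hatch c),
    List.filter_congr (fun c _ => idx_clean_git c),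
    step_eq]
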